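-- pv_equiv track=rewrite | github.com/sd911223/qp | server/server/games/pao_de_kuai/rules.py | valid_deny_split_bomb
-- ===== SOURCE A (Python) =====
-- def valid_deny_split_bomb(out_cards, cards, deny_split_bomb, three_a_bomb, card_count):
--     out_cards_value = []
--     cards_value = []
--     for card in out_cards:
--         out_cards_value.append(card % 100)
--     for card in cards:
--         cards_value.append(card % 100)
--     for i in cards_value:
--         if cards_value.count(i) == 4 and out_cards_value.count(i) >= 1 and len(out_cards) != 4:
--             return not deny_split_bomb
--         if three_a_bomb:
--             if card_count == 16 and i == 14 and cards_value.count(i) == 3 and \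
--                     out_cards_value.count(i) >= 1 and len(out_cards) != 3:
--                 return not deny_split_bomb
--             elif card_count == 15 and i == 13 and cards_value.count(i) == 3 and \
--                     out_cards_value.count(i) >= 1 and len(out_cards) != 3:
--                 return not deny_split_bomb
--     return True
-- ===== SOURCE B (Python) =====
-- def valid_deny_split_bomb(out_cards, cards, deny_split_bomb, three_a_bomb, card_count):
--     out_vals = set(o % 100 for o in out_cards)
--
--     def broken(vals):
--         # partition-by-head recursion: each distinct value is judged exactly once
--         if not vals:
--             return False
--         v = vals[0]
--         same = [x for x in vals if x == v]
--         rest = [x for x in vals if x != v]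
--         hit = v in out_vals
--         if hit and len(same) == 4 and len(out_cards) != 4:
--             return True
--         if three_a_bomb and hit and len(same) == 3 and len(out_cards) != 3 and \
--                 ((card_count == 16 and v == 14) or (card_count == 15 and v == 13)):
--             return True
--         return broken(rest)
--
--     return (not deny_split_bomb) if broken([c % 100 for c in cards]) else True
-- ===== Notes on version B (the rewrite author's own statement) =====
-- stated objective: faster
-- what changed: Replaces A's per-card loop with repeated list.count scans by a recursive partition-by-head grouping: each distinct value is split off with its whole group once, judged against a precomputed set of out-card values, and the recursion continues on the residue, so no value is counted twice.
import Mathlib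
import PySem

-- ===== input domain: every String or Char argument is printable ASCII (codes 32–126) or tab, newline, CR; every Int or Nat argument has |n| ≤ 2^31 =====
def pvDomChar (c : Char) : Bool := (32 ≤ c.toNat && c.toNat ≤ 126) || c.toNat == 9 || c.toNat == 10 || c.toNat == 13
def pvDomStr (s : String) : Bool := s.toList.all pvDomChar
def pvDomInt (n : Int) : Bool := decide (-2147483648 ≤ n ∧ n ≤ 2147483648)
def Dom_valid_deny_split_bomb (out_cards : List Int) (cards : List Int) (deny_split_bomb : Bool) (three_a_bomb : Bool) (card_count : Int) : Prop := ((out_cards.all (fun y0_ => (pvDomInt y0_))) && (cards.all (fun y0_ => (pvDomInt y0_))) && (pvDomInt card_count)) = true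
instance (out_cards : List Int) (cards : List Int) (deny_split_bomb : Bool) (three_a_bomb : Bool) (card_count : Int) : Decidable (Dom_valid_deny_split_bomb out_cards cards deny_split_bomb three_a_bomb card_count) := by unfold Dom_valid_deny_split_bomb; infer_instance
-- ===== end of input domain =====

-- B replaces A's per-card loop over repeated list.count scans by a recursive partition-by-head
-- grouping (each distinct value split off with its whole group once) against a precomputed out-value set
-- (objective: faster; a timing run measured B faster on the generated large inputs).

-- ===== PORT A =====
-- the 'for i in cards_value' loop with its early returns
def pvA_loop (cards_value out_cards_value : List Int) (out_len : Nat)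
    (deny_split_bomb three_a_bomb : Bool) (card_count : Int) : List Int → Bool
  | [] => true
  | i :: rest =>
    if cards_value.count i == 4 && decide (1 ≤ out_cards_value.count i) && !(out_len == 4) then
      !deny_split_bomb
    else if three_a_bomb then
      if card_count == 16 && i == 14 && cards_value.count i == 3 &&
          decide (1 ≤ out_cards_value.count i) && !(out_len == 3) then !deny_split_bomb
      else if card_count == 15 && i == 13 && cards_value.count i == 3 &&
          decide (1 ≤ out_cards_value.count i) && !(out_len == 3) then !deny_split_bomb
      else pvA_loop cards_value out_cards_value out_len deny_split_bomb three_a_bomb card_count rest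
    else pvA_loop cards_value out_cards_value out_len deny_split_bomb three_a_bomb card_count rest

def valid_deny_split_bomb (out_cards : List Int) (cards : List Int) (deny_split_bomb : Bool) (three_a_bomb : Bool) (card_count : Int) : Bool :=
  let out_cards_value : List Int := out_cards.foldl (fun acc card => acc ++ [PySem.Int.mod card 100]) []
  let cards_value : List Int := cards.foldl (fun acc card => acc ++ [PySem.Int.mod card 100]) []
  pvA_loop cards_value out_cards_value out_cards.length deny_split_bomb three_a_bomb card_count cards_value

-- ===== PORT B =====
-- the recursive 'broken' helper: partition the values by the head value, judge that group, recurse on the rest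
def pvB_broken (out_vals : PySem.Set Int) (out_len : Nat) (three_a_bomb : Bool) (card_count : Int) : List Int → Bool
  | [] => false
  | v :: vs =>
    let same := (v :: vs).filter (fun x => x == v)
    let rest := (v :: vs).filter (fun x => !(x == v))
    let hit := PySem.Set.contains out_vals v
    if hit && same.length == 4 && !(out_len == 4) then true
    else if three_a_bomb && hit && same.length == 3 && !(out_len == 3) &&
        ((card_count == 16 && v == 14) || (card_count == 15 && v == 13)) then true
    else pvB_broken out_vals out_len three_a_bomb card_count rest
termination_by l => l.length
decreasing_by
  simp only [List.filter_cons, beq_self_eq_true, Bool.not_true, List.length_cons]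
  exact Nat.lt_succ_of_le (List.length_filter_le _ _)

def valid_deny_split_bomb_alt (out_cards : List Int) (cards : List Int) (deny_split_bomb : Bool) (three_a_bomb : Bool) (card_count : Int) : Bool :=
  let out_vals : PySem.Set Int := PySem.Set.ofList (out_cards.map (fun o => PySem.Int.mod o 100))
  if pvB_broken out_vals out_cards.length three_a_bomb card_count
      (cards.map (fun c => PySem.Int.mod c 100)) then !deny_split_bomb else true

-- ===== PRECONDITION & SPEC =====
def Spec_valid_deny_split_bomb (out_cards : List Int) (cards : List Int) (deny_split_bomb : Bool) (three_a_bomb : Bool) (card_count : Int) (out : Bool) : Prop := out = valid_deny_split_bomb_alt out_cards cards deny_split_bomb three_a_bomb card_count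
instance (out_cards : List Int) (cards : List Int) (deny_split_bomb : Bool) (three_a_bomb : Bool) (card_count : Int) (out : Bool) : Decidable (Spec_valid_deny_split_bomb out_cards cards deny_split_bomb three_a_bomb card_count out) := by unfold Spec_valid_deny_split_bomb; infer_instance

-- ===== CLAIM (what is proved, stated in full; the proofs are below) =====
def Claim_equal_valid_deny_split_bomb : Prop := ∀ (out_cards : List Int) (cards : List Int) (deny_split_bomb : Bool) (three_a_bomb : Bool) (card_count : Int), Dom_valid_deny_split_bomb out_cards cards deny_split_bomb three_a_bomb card_count → Spec_valid_deny_split_bomb out_cards cards deny_split_bomb three_a_bomb card_count (valid_deny_split_bomb out_cards cards deny_split_bomb three_a_bomb card_count)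

-- ===== LEMMAS AND PROOFS =====

theorem pv_foldl_append_map (f : Int → Int) : ∀ (l : List Int) (acc : List Int),
    l.foldl (fun acc c => acc ++ [f c]) acc = acc ++ l.map f := by
  intro l
  induction l with
  | nil => simp
  | cons x xs ih => intro acc; simp [List.foldl_cons, ih]

-- A's loop condition for a value i (counts taken in the full list cv)
def pvCondA (cv ov : List Int) (n : Nat) (t : Bool) (cc : Int) (i : Int) : Bool :=
  (cv.count i == 4 && decide (1 ≤ ov.count i) && !(n == 4)) ||
  (t && ((cc == 16 && i == 14 && cv.count i == 3 && decide (1 ≤ ov.count i) && !(n == 3)) ||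
         (cc == 15 && i == 13 && cv.count i == 3 && decide (1 ≤ ov.count i) && !(n == 3))))

-- B's per-value condition (counts taken in the list l it is applied to)
def pvCondB (ov : PySem.Set Int) (n : Nat) (t : Bool) (cc : Int) (l : List Int) (i : Int) : Bool :=
  (PySem.Set.contains ov i && l.count i == 4 && !(n == 4)) ||
  (t && PySem.Set.contains ov i && l.count i == 3 && !(n == 3) &&
    ((cc == 16 && i == 14) || (cc == 15 && i == 13)))

-- the loop returns !deny iff some element satisfies the combined test
theorem pvA_loop_eq (cv ov : List Int) (n : Nat) (d t : Bool) (cc : Int) (l : List Int) :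
    pvA_loop cv ov n d t cc l = (if l.any (pvCondA cv ov n t cc) then !d else true) := by
  induction l with
  | nil => simp [pvA_loop]
  | cons i rest ih =>
    rw [pvA_loop, List.any_cons]
    by_cases h1 : (cv.count i == 4 && decide (1 ≤ ov.count i) && !(n == 4)) = true
    · rw [if_pos h1]
      have : pvCondA cv ov n t cc i = true := by
        simp only [pvCondA, h1, Bool.true_or]
      rw [this]; simp
    · have h1' : (cv.count i == 4 && decide (1 ≤ ov.count i) && !(n == 4)) = false :=
        Bool.eq_false_iff.mpr h1
      rw [if_neg h1]
      simp only [pvCondA, h1', Bool.false_or]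
      cases t with
      | false => rw [if_neg (by simp), ih, Bool.false_and, Bool.false_or]
      | true =>
        rw [if_pos rfl, Bool.true_and]
        by_cases h2 : (cc == 16 && i == 14 && cv.count i == 3 && decide (1 ≤ ov.count i) && !(n == 3)) = true
        · rw [if_pos h2, h2]; try simp
        · have h2' := Bool.eq_false_iff.mpr h2
          rw [if_neg h2, h2', Bool.false_or]
          by_cases h3 : (cc == 15 && i == 13 && cv.count i == 3 && decide (1 ≤ ov.count i) && !(n == 3)) = true
          · rw [if_pos h3, h3]; try simp
          · have h3' := Bool.eq_false_iff.mpr h3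
            rw [if_neg h3, h3', Bool.false_or, ih]

theorem pv_any_head_filter (f : Int → Bool) (v : Int) (l : List Int) (hv : v ∈ l) :
    l.any f = (f v || (l.filter (fun x => !(x == v))).any f) := by
  rw [Bool.eq_iff_iff]
  simp only [List.any_eq_true, Bool.or_eq_true, List.mem_filter, Bool.not_eq_true',
    beq_eq_false_iff_ne, ne_eq]
  constructor
  · rintro ⟨x, hx, hfx⟩
    by_cases hxv : x = v
    · subst hxv; exact Or.inl hfx
    · exact Or.inr ⟨x, ⟨hx, hxv⟩, hfx⟩
  · rintro (h | ⟨x, ⟨hx, _⟩, hfx⟩)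
    · exact ⟨v, hv, h⟩
    · exact ⟨x, hx, hfx⟩

-- pvB_broken l decides "some value of l satisfies pvCondB (with counts in l)"
theorem pvB_broken_eq (ov : PySem.Set Int) (n : Nat) (t : Bool) (cc : Int) (l : List Int) :
    pvB_broken ov n t cc l = l.any (pvCondB ov n t cc l) := by
  generalize hk : l.length = k
  induction k using Nat.strong_induction_on generalizing l with
  | _ k ih =>
    match l with
    | [] => simp [pvB_broken]
    | v :: vs =>
      rw [pvB_broken]
      have hrest_eq : ((v :: vs).filter (fun x => !(x == v))) = vs.filter (fun x => !(x == v)) := by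
        simp
      have hrl : (vs.filter (fun x => !(x == v))).length < k := by
        subst hk
        exact Nat.lt_succ_of_le (List.length_filter_le _ _)
      have hsame : ((v :: vs).filter (fun x => x == v)).length = (v :: vs).count v := by
        simp [List.count_eq_countP, List.countP_eq_length_filter]
      have hcount : ∀ i, i ≠ v →
          (vs.filter (fun x => !(x == v))).count i = (v :: vs).count i := by
        intro i hi
        rw [← hrest_eq]
        exact List.count_filter (by simp [hi])
      have hih := ih _ hrl (vs.filter (fun x => !(x == v))) rfl
      have hcongr : (vs.filter (fun x => !(x == v))).any
            (pvCondB ov n t cc (vs.filter (fun x => !(x == v))))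
          = (vs.filter (fun x => !(x == v))).any (pvCondB ov n t cc (v :: vs)) := by
        rw [Bool.eq_iff_iff]
        simp only [List.any_eq_true]
        constructor <;> rintro ⟨x, hx, hfx⟩ <;> refine ⟨x, hx, ?_⟩ <;>
          · have hxv : x ≠ v := by
              have := (List.mem_filter.mp hx).2
              simpa [bne] using this
            simpa [pvCondB, hcount x hxv] using hfx
      have hsplit := pv_any_head_filter (pvCondB ov n t cc (v :: vs)) v (v :: vs)
        (List.mem_cons_self ..)
      rw [hsplit, hrest_eq, ← hcongr, ← hih]
      simp only [hsame]
      set c1 := PySem.Set.contains ov v && ((v :: vs).count v == 4) && !(n == 4) with hc1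
      set c2 := t && PySem.Set.contains ov v && ((v :: vs).count v == 3) && !(n == 3) &&
        ((cc == 16 && v == 14) || (cc == 15 && v == 13)) with hc2
      have hfv : pvCondB ov n t cc (v :: vs) v = (c1 || c2) := by
        simp only [pvCondB, hc1, hc2]
      rw [hfv]
      cases c1 <;> cases c2 <;> simp

theorem pv_contains_ofList_count (ovl : List Int) (i : Int) :
    PySem.Set.contains (PySem.Set.ofList ovl) i = decide (1 ≤ List.count i ovl) := by
  rw [Bool.eq_iff_iff, PySem.Set.contains_iff, PySem.Set.mem_ofList, decide_eq_true_iff]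
  exact ⟨fun h => List.count_pos_iff.mpr h, fun h => List.count_pos_iff.mp h⟩

theorem pv_bool_id : ∀ (h a3 a4 n4 n3 e16 i14 e15 i13 t : Bool),
    ((a4 && h && !n4) || (t && ((e16 && i14 && a3 && h && !n3) || (e15 && i13 && a3 && h && !n3))))
    = ((h && a4 && !n4) || (t && h && a3 && !n3 && ((e16 && i14) || (e15 && i13)))) := by
  decide

theorem pv_cond_eq (cv ovl : List Int) (n : Nat) (t : Bool) (cc : Int) :
    pvCondA cv ovl n t cc = pvCondB (PySem.Set.ofList ovl) n t cc cv := by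
  funext i
  simp only [pvCondA, pvCondB, pv_contains_ofList_count]
  exact pv_bool_id (decide (1 ≤ List.count i ovl)) (cv.count i == 3) (cv.count i == 4)
    (n == 4) (n == 3) (cc == 16) (i == 14) (cc == 15) (i == 13) t

-- ===== VERDICT (by name: the statement is the Claim_ definition above) =====
theorem valid_deny_split_bomb_spec : Claim_equal_valid_deny_split_bomb := by
  intro out_cards cards d t cc _
  unfold Spec_valid_deny_split_bomb valid_deny_split_bomb valid_deny_split_bomb_alt
  simp only [pv_foldl_append_map, List.nil_append]
  rw [pvA_loop_eq, pvB_broken_eq, pv_cond_eq]
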